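-- pv_equiv track=rewrite | github.com/nicky-eng/Escuelita_Gabo_Lato | Ej_6_3.py | numeros_por_caracter
-- ===== SOURCE A (Python) =====
-- def numeros_por_caracter(cadena, caracter, maxi):
--     """Reemplaza todos los número por el caracter."""
--     nueva_cadena = ''
--     contador = 0
--
--     for i in cadena:
--         if i.isdigit() == True and contador < maxi:
--             nueva_cadena = nueva_cadena + caracter
--             contador += 1
--         else:
--             nueva_cadena = nueva_cadena + i
--
--     return nueva_cadena
-- ===== SOURCE B (Python) =====
-- def numeros_por_caracter(cadena, caracter, maxi):
--     """Reemplaza los primeros maxi digitos por el caracter (dos pasadas)."""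
--     digit_pos = [i for i, c in enumerate(cadena) if c.isdigit()]
--     rep = set(digit_pos[:maxi]) if maxi > 0 else set()
--     return ''.join(caracter if i in rep else c for i, c in enumerate(cadena))
-- ===== Notes on version B (the rewrite author's own statement) =====
-- stated objective: alternative
-- what changed: B is two staged passes: it first builds the list of all digit positions, takes the first maxi of them into a set, and then renders the string by a position-membership lookup, instead of A's single pass that threads a replacement counter through the loop.
import Mathlib
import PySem

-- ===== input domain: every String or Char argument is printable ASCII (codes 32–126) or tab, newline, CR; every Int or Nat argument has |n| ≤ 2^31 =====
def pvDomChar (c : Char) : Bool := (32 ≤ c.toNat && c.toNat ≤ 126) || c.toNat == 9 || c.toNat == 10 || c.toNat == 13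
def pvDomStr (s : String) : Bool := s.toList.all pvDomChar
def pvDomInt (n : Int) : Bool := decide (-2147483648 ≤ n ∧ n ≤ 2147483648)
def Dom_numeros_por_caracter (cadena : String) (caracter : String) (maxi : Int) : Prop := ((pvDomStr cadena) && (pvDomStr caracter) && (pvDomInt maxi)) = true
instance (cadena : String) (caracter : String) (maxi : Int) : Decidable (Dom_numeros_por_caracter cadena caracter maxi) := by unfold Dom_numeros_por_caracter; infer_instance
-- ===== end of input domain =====

-- B replaces A's single counter-threading pass by two staged passes: collect all digit positions,
-- keep the first maxi of them as a set, then render by membership lookup (alternative decomposition, same cost).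


-- ===== PORT A =====
-- the for-loop: state (nueva_cadena as List Char, contador)
def pvAStep (caracter : List Char) (maxi : Int) (st : List Char × Int) (i : Char) : List Char × Int :=
  if PySem.Chars.isdigit i = true ∧ st.2 < maxi then (st.1 ++ caracter, st.2 + 1)
  else (st.1 ++ [i], st.2)

def numeros_por_caracter (cadena : String) (caracter : String) (maxi : Int) : String :=
  String.ofList (cadena.toList.foldl (pvAStep caracter.toList maxi) ([], 0)).1

-- ===== PORT B =====
-- digit_pos = [i for i, c in enumerate(cadena) if c.isdigit()]
def pvDigitPos (l : List Char) : List Int :=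
  ((PySem.List.enumerate l 0).filter (fun p => PySem.Chars.isdigit p.2)).map (·.1)

def numeros_por_caracter_alt (cadena : String) (caracter : String) (maxi : Int) : String :=
  let pos := pvDigitPos cadena.toList
  -- rep = set(digit_pos[:maxi]) if maxi > 0 else set()
  let rep : PySem.Set Int :=
    if 0 < maxi then PySem.Set.ofList (PySem.List.slice pos none (some maxi)) else PySem.Set.empty
  -- ''.join(caracter if i in rep else c for i, c in enumerate(cadena))
  String.ofList ((PySem.List.enumerate cadena.toList 0).flatMap
    (fun p => if PySem.Set.contains rep p.1 then caracter.toList else [p.2]))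

-- ===== PRECONDITION & SPEC =====
def Spec_numeros_por_caracter (cadena : String) (caracter : String) (maxi : Int) (out : String) : Prop := out = numeros_por_caracter_alt cadena caracter maxi
instance (cadena : String) (caracter : String) (maxi : Int) (out : String) : Decidable (Spec_numeros_por_caracter cadena caracter maxi out) := by unfold Spec_numeros_por_caracter; infer_instance

-- ===== CLAIM (what is proved, stated in full; the proofs are below) =====
def Claim_equal_numeros_por_caracter : Prop := ∀ (cadena : String) (caracter : String) (maxi : Int), Dom_numeros_por_caracter cadena caracter maxi → Spec_numeros_por_caracter cadena caracter maxi (numeros_por_caracter cadena caracter maxi)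

-- ===== LEMMAS AND PROOFS =====

-- digit positions starting at s, as a recursion (proof view of pvDigitPos)
def pvPos : List Char → Int → List Int
  | [], _ => []
  | c :: rest, s =>
    if PySem.Chars.isdigit c then s :: pvPos rest (s + 1) else pvPos rest (s + 1)

theorem pvDigitPos_eq_pvPos (l : List Char) (s : Int) :
    ((PySem.List.enumerate l s).filter (fun p => PySem.Chars.isdigit p.2)).map (·.1) = pvPos l s := by
  induction l generalizing s with
  | nil => simp [PySem.List.enumerate, pvPos]
  | cons c rest ih =>
    by_cases hd : PySem.Chars.isdigit c <;>
      simp [PySem.List.enumerate_cons, pvPos, hd, ih]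

theorem pvPos_ge (l : List Char) (s : Int) : ∀ x ∈ pvPos l s, s ≤ x := by
  induction l generalizing s with
  | nil => simp [pvPos]
  | cons c rest ih =>
    intro x hx
    by_cases hd : PySem.Chars.isdigit c <;> simp [pvPos, hd] at hx
    · rcases hx with rfl | hx
      · omega
      · have := ih (s + 1) x hx; omega
    · have := ih (s + 1) x hx; omega

theorem pvPos_pairwise (l : List Char) (s : Int) : (pvPos l s).Pairwise (· < ·) := by
  induction l generalizing s with
  | nil => simp [pvPos]
  | cons c rest ih =>
    by_cases hd : PySem.Chars.isdigit c <;> simp [pvPos, hd]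
    · exact ⟨fun x hx => by have := pvPos_ge rest (s + 1) x hx; omega, ih (s + 1)⟩
    · exact ih (s + 1)

theorem pvFlatMap_congr {α β : Type} (xs : List α) (f g : α → List β)
    (h : ∀ p ∈ xs, f p = g p) : xs.flatMap f = xs.flatMap g := by
  induction xs with
  | nil => rfl
  | cons x xs ih =>
    simp only [List.flatMap_cons, h x (by simp), ih (fun p hp => h p (by simp [hp]))]

-- main invariant: A's fold from (acc, cont) renders exactly the first (maxi - cont) digit positions
theorem pvMain (car : List Char) (maxi : Int) (l : List Char) (s cont : Int) (acc : List Char) :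
    (l.foldl (pvAStep car maxi) (acc, cont)).1
      = acc ++ (PySem.List.enumerate l s).flatMap
          (fun p => if p.1 ∈ (pvPos l s).take (maxi - cont).toNat then car else [p.2]) := by
  induction l generalizing s cont acc with
  | nil => simp [PySem.List.enumerate]
  | cons c rest ih =>
    by_cases hd : PySem.Chars.isdigit c
    · by_cases hlt : cont < maxi
      · have hstep : pvAStep car maxi (acc, cont) c = (acc ++ car, cont + 1) := by
          simp [pvAStep, hd, hlt]
        obtain ⟨k, hk⟩ : ∃ k, (maxi - cont).toNat = k + 1 := ⟨(maxi - cont).toNat - 1, by omega⟩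
        have hk' : (maxi - (cont + 1)).toNat = k := by omega
        have htail : (PySem.List.enumerate rest (s + 1)).flatMap
              (fun p => if p.1 ∈ (pvPos (c :: rest) s).take (maxi - cont).toNat then car else [p.2])
            = (PySem.List.enumerate rest (s + 1)).flatMap
              (fun p => if p.1 ∈ (pvPos rest (s + 1)).take (maxi - (cont + 1)).toNat then car else [p.2]) := by
          apply pvFlatMap_congr
          intro p hp
          rcases (PySem.List.mem_enumerate_iff _ _ _).1 hp with ⟨j, hj, rfl⟩
          simp only [pvPos, hd, if_pos, hk, hk', List.take_succ_cons]
          have hne : s + 1 + (j : Int) ≠ s := by omega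
          simp [hne]
        calc (List.foldl (pvAStep car maxi) (acc, cont) (c :: rest)).1
            = (rest.foldl (pvAStep car maxi) (acc ++ car, cont + 1)).1 := by
              simp [List.foldl, hstep]
          _ = (acc ++ car) ++ (PySem.List.enumerate rest (s + 1)).flatMap
                (fun p => if p.1 ∈ (pvPos rest (s + 1)).take (maxi - (cont + 1)).toNat then car else [p.2]) :=
              ih (s + 1) (cont + 1) (acc ++ car)
          _ = _ := by
              rw [PySem.List.enumerate_cons, List.flatMap_cons, ← htail]
              have hs : s ∈ (pvPos (c :: rest) s).take (maxi - cont).toNat := by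
                simp [pvPos, hd, hk]
              simp [hs]
      · have hstep : pvAStep car maxi (acc, cont) c = (acc ++ [c], cont) := by
          simp [pvAStep]; omega
        have hk : (maxi - cont).toNat = 0 := by omega
        simp only [List.foldl, hstep, ih (s + 1) cont (acc ++ [c]), hk, List.take_zero,
          List.not_mem_nil, if_false, PySem.List.enumerate_cons, List.flatMap_cons]
        simp
    · have hstep : pvAStep car maxi (acc, cont) c = (acc ++ [c], cont) := by
        simp [pvAStep, hd]
      have hpos : pvPos (c :: rest) s = pvPos rest (s + 1) := by simp [pvPos, hd]
      have hs : s ∉ (pvPos rest (s + 1)).take (maxi - cont).toNat := by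
        intro hmem
        have := pvPos_ge rest (s + 1) s (List.mem_of_mem_take hmem)
        omega
      simp only [List.foldl, hstep, ih (s + 1) cont (acc ++ [c]), PySem.List.enumerate_cons,
        List.flatMap_cons, hpos, hs, if_false]
      simp

theorem pvRep_eq (l : List Char) (maxi : Int) :
    (if 0 < maxi then PySem.Set.ofList (PySem.List.slice (pvDigitPos l) none (some maxi)) else PySem.Set.empty)
      = (pvPos l 0).take maxi.toNat := by
  rw [pvDigitPos, pvDigitPos_eq_pvPos]
  by_cases h : 0 < maxi
  · rw [if_pos h, PySem.List.slice_to _ (le_of_lt h)]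
    exact PySem.Set.ofList_eq_self_of_nodup _
      (((pvPos_pairwise l 0).imp (fun hlt => ne_of_lt hlt)).sublist (List.take_sublist _ _))
  · rw [if_neg h]
    have : maxi.toNat = 0 := by omega
    simp [this, PySem.Set.empty]

-- ===== VERDICT (by name: the statement is the Claim_ definition above) =====
theorem numeros_por_caracter_spec : Claim_equal_numeros_por_caracter := by
  intro cadena caracter maxi _
  show _ = _
  rw [numeros_por_caracter, numeros_por_caracter_alt, pvRep_eq,
    pvMain caracter.toList maxi cadena.toList 0 0 []]
  simp only [List.nil_append, Int.sub_zero]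
  congr 1
  apply pvFlatMap_congr
  intro p _
  by_cases hm : p.1 ∈ (pvPos cadena.toList 0).take maxi.toNat
  · simp [hm]
  · simp [hm]
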